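-- pv_equiv track=rewrite | github.com/ericosur/ericosur-snippet | prime/mk_table/use_primeseive.py | make_arrow
-- ===== SOURCE A (Python) =====
-- def make_arrow(lower, v, upper):
--     '''
--     for example, this function returns ===#=== or --#----
--     example lines like the following lines
--
--     914863 is in the range of (914861 =#=== 914867)
--     831004 is in the range of (830989 ----#------ 831023)
--
--     equal sign means this is actual numbers between two primes
--     minus sign mean it is ratio between two primes
--     '''
--
--     # special case
--     if upper - lower == 2:
--         return "[#]  (between twin primes)"
--
--     s = ''
--     max_len = 15
--     step = '-'
--     d = abs(upper - lower)
--     if d < max_len: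
--         s = '['
--         cnt = 1
--         for _ in range(abs(v-lower-1)):
--             if cnt == 4 or cnt == 9 or cnt == 14:
--                 s += '_'
--             else:
--                 s += step
--             cnt += 1
--
--         s += '#'
--         cnt += 1
--         for _ in range(abs(v-upper)-1):
--             if cnt == 4 or cnt == 9 or cnt == 14:
--                 s += '_'
--             else:
--                 s += step
--             cnt += 1
--
--         s += ']'
--         return s
--
--     r = int(abs(v-lower)/(upper-lower) * max_len)
--     for i in range(max_len):
--         if i == r:
--             s += "#"
--         else:
--             s += step
--     return s
-- ===== SOURCE B (Python) =====
-- def make_arrow(lower, v, upper):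
--     # Template-and-patch: slice a precomputed segment template and splice the
--     # '#' in by position, instead of generating the bar character by character.
--     if upper - lower == 2:
--         return "[#]  (between twin primes)"
--     TEMPLATE = "---_----_----_-"
--     if abs(upper - lower) < 15:
--         left = abs(v - lower - 1)
--         total = left + 1 + max(0, abs(v - upper) - 1)
--         bar = TEMPLATE[:total] if total <= 15 else TEMPLATE + '-' * (total - 15)
--         return '[' + bar[:left] + '#' + bar[left + 1:] + ']'
--     r = int(abs(v - lower) / (upper - lower) * 15)
--     line = '-' * 15
--     if 0 <= r < 15:
--         line = line[:r] + '#' + line[r + 1:]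
--     return line
-- ===== Notes on version B (the rewrite author's own statement) =====
-- stated objective: alternative
-- what changed: B builds the bar by template-and-patch string surgery: it slices a precomputed 15-char segment template (padded with dashes) to the needed width and splices the '#' in by slicing, instead of A's per-character loops that decide each character with a running counter; the wide branch likewise patches a constant dash line instead of looping.
import Mathlib
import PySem

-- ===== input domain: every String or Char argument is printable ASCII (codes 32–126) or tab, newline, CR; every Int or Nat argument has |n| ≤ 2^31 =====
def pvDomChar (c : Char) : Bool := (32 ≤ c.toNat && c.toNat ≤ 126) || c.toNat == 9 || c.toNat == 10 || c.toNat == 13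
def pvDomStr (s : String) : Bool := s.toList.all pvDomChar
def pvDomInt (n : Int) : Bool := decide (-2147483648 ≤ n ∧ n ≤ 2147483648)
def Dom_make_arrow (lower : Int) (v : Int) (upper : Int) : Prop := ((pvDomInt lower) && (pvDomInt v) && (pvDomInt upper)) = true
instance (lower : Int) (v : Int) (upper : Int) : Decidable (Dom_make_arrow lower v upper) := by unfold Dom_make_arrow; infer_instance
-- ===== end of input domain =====

-- B builds the bar by template-and-patch string surgery (slice a precomputed template, splice '#' in)
-- instead of A's per-character counter loops; objective: alternative.
-- Both ports: `int(abs(v-lower)/(upper-lower) * 15)` uses float division in Python; on the stated |int| ≤ 2^31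
-- domain the float roundings never cross the truncation boundary, so the result equals exact toward-zero
-- integer division of 15*|v-lower| by (upper-lower); both ports use that exact integer form.

-- ===== PORT A =====
-- one segment loop of A: `for _ in range(n): s += '_' if cnt in {4,9,14} else '-'; cnt += 1`
def arrowSeg : Nat → String → Int → String × Int
  | 0, s, cnt => (s, cnt)
  | n+1, s, cnt =>
      arrowSeg n (if cnt = 4 ∨ cnt = 9 ∨ cnt = 14 then s ++ "_" else s ++ "-") (cnt + 1)

-- final loop of A: `for i in range(15): s += '#' if i == r else '-'`
def arrowTail : List Int → Int → String → String
  | [], _, s => s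
  | i :: t, r, s => arrowTail t r (if i = r then s ++ "#" else s ++ "-")

def make_arrow (lower : Int) (v : Int) (upper : Int) : String :=
  if upper - lower = 2 then "[#]  (between twin primes)"
  else
    let d : Int := |upper - lower|
    if d < 15 then
      let p1 := arrowSeg (v - lower - 1).natAbs "[" 1
      let s1 := p1.1 ++ "#"
      let cnt1 := p1.2 + 1
      let p2 := arrowSeg (|v - upper| - 1).toNat s1 cnt1
      p2.1 ++ "]"
    else
      -- float expression, ported exactly as toward-zero Int division (see header)
      let r : Int := (|v - lower| * 15) / (upper - lower)
      arrowTail (PySem.List.pyRange 0 15 1) r ""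

-- ===== PORT B =====
-- TEMPLATE = "---_----_----_-"
def arrowTemplate : List Char := ['-','-','-','_','-','-','-','-','_','-','-','-','-','_','-']

def make_arrow_alt (lower : Int) (v : Int) (upper : Int) : String :=
  if upper - lower = 2 then "[#]  (between twin primes)"
  else if |upper - lower| < 15 then
    let left : Nat := (v - lower - 1).natAbs                    -- abs(v-lower-1)
    let total : Nat := left + 1 + (|v - upper| - 1).toNat       -- left + 1 + max(0, abs(v-upper)-1)
    let bar : List Char :=
      if total ≤ 15 then arrowTemplate.take total
      else arrowTemplate ++ List.replicate (total - 15) '-'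
    String.ofList ('[' :: (bar.take left ++ '#' :: bar.drop (left + 1)) ++ [']'])
  else
    -- same float expression, same exact integer form (see header)
    let r : Int := (|v - lower| * 15) / (upper - lower)
    let line : List Char := List.replicate 15 '-'
    if 0 ≤ r ∧ r < 15 then
      String.ofList (line.take r.toNat ++ '#' :: line.drop (r.toNat + 1))
    else String.ofList line

-- ===== PRECONDITION & SPEC =====
def Spec_make_arrow (lower : Int) (v : Int) (upper : Int) (out : String) : Prop := out = make_arrow_alt lower v upper
instance (lower : Int) (v : Int) (upper : Int) (out : String) : Decidable (Spec_make_arrow lower v upper out) := by unfold Spec_make_arrow; infer_instance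

-- ===== CLAIM (what is proved, stated in full; the proofs are below) =====
def Claim_equal_make_arrow : Prop := ∀ (lower : Int) (v : Int) (upper : Int), Dom_make_arrow lower v upper → Spec_make_arrow lower v upper (make_arrow lower v upper)

-- ===== LEMMAS AND PROOFS =====

theorem arrowSeg_snd (n : Nat) (s : String) (c : Int) : (arrowSeg n s c).2 = c + n := by
  induction n generalizing s c with
  | zero => simp [arrowSeg]
  | succ n ih => rw [arrowSeg, ih]; push_cast; ring

theorem arrowSeg_fst (n : Nat) (s : String) (c : Int) :
    (arrowSeg n s c).1.toList = s.toList ++ (List.range n).map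
      (fun i : Nat => if c + (i : Int) = 4 ∨ c + (i : Int) = 9 ∨ c + (i : Int) = 14 then '_' else '-') := by
  induction n generalizing s c with
  | zero => rw [arrowSeg]; simp
  | succ n ih =>
      rw [arrowSeg, ih, List.range_succ_eq_map]
      simp only [List.map_cons, List.map_map]
      rw [List.append_cons]
      congr 1
      · split_ifs with h h' h' <;> simp_all
      · apply List.map_congr_left
        intro i _
        have h : c + ((i + 1 : Nat) : Int) = c + 1 + (i : Int) := by push_cast; ring
        simp only [Function.comp, Nat.succ_eq_add_one, h]

theorem arrowTail_toList (l : List Int) (r : Int) (s : String) :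
    (arrowTail l r s).toList = s.toList ++ l.map (fun i => if i = r then '#' else '-') := by
  induction l generalizing s with
  | nil => rw [arrowTail]; simp
  | cons i t ih =>
      rw [arrowTail, ih, List.map_cons, List.append_cons]
      congr 1
      split_ifs <;> simp

-- the padded template equals the positional map of the underscore rule
theorem arrowBar_eq (T : Nat) :
    (if T ≤ 15 then arrowTemplate.take T else arrowTemplate ++ List.replicate (T - 15) '-')
      = (List.range T).map (fun i => if i = 3 ∨ i = 8 ∨ i = 13 then '_' else '-') := by
  apply List.ext_getElem
  · split_ifs with h <;> simp [arrowTemplate] <;> omega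
  · intro i h1 h2
    have hiT : i < T := by simpa using h2
    split_ifs with h
    · have hi15 : i < 15 := by omega
      rw [List.getElem_take, List.getElem_map, List.getElem_range]
      interval_cases i <;> rfl
    · by_cases hi : i < 15
      · rw [List.getElem_append_left (by simpa [arrowTemplate] using hi), List.getElem_map, List.getElem_range]
        interval_cases i <;> rfl
      · rw [List.getElem_append_right (by simpa [arrowTemplate] using hi), List.getElem_map, List.getElem_range]
        simp only [List.getElem_replicate]
        rw [if_neg (by omega)]

-- ===== VERDICT (by name: the statement is the Claim_ definition above) =====
theorem make_arrow_spec : Claim_equal_make_arrow := by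
  intro lower v upper _
  unfold Spec_make_arrow
  by_cases h1 : upper - lower = 2
  · simp [make_arrow, make_arrow_alt, h1]
  by_cases h2 : |upper - lower| < 15
  · -- narrow-gap branch
    simp only [make_arrow, make_arrow_alt, if_neg h1, if_pos h2]
    apply String.toList_inj.mp
    set L : Nat := (v - lower - 1).natAbs with hL
    set R : Nat := (|v - upper| - 1).toNat with hR
    -- A side: unfold the two counter loops into positional maps
    simp only [String.toList_append, arrowSeg_fst, arrowSeg_snd, String.toList_ofList]
    -- B side: the patched bar is the positional map
    rw [arrowBar_eq (L + 1 + R)]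
    set u : Nat → Char := fun i => if i = 3 ∨ i = 8 ∨ i = 13 then '_' else '-' with hu
    have hdec : (List.range (L + 1 + R)).map u
        = (List.range L).map u ++ u L :: (List.range R).map (fun j => u (L + 1 + j)) := by
      rw [List.range_add, List.range_add, List.map_append, List.map_append, List.map_map,
          List.map_map, List.append_assoc]
      simp [List.range_succ]
    rw [hdec]
    rw [List.take_append_of_le_length (by simp), List.take_of_length_le (by simp),
        show (List.range L).map u ++ u L :: (List.range R).map (fun j => u (L + 1 + j))
           = ((List.range L).map u ++ [u L]) ++ (List.range R).map (fun j => u (L + 1 + j)) from by simp,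
        List.drop_append_of_le_length (by simp), List.drop_of_length_le (by simp)]
    simp only [List.nil_append]
    -- match the three pieces
    have e1 : (List.range L).map
        (fun i : Nat => if 1 + (i : Int) = 4 ∨ 1 + (i : Int) = 9 ∨ 1 + (i : Int) = 14 then '_' else '-')
        = (List.range L).map u := by
      apply List.map_congr_left; intro i _
      have h : (1 + (i : Int) = 4 ∨ 1 + (i : Int) = 9 ∨ 1 + (i : Int) = 14) ↔ (i = 3 ∨ i = 8 ∨ i = 13) := by
        omega
      simp [hu, h]
    have e2 : (List.range R).map
        (fun j : Nat => if 1 + (L : Int) + 1 + (j : Int) = 4 ∨ 1 + (L : Int) + 1 + (j : Int) = 9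
            ∨ 1 + (L : Int) + 1 + (j : Int) = 14 then '_' else '-')
        = (List.range R).map (fun j => u (L + 1 + j)) := by
      apply List.map_congr_left; intro j _
      have h : (1 + (L : Int) + 1 + (j : Int) = 4 ∨ 1 + (L : Int) + 1 + (j : Int) = 9
            ∨ 1 + (L : Int) + 1 + (j : Int) = 14) ↔ (L + 1 + j = 3 ∨ L + 1 + j = 8 ∨ L + 1 + j = 13) := by
        omega
      simp [hu, h]
    rw [← e1, ← e2]
    simp
  · -- wide-gap branch
    simp only [make_arrow, make_arrow_alt, if_neg h1, if_neg h2]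
    apply String.toList_inj.mp
    rw [arrowTail_toList,
        show PySem.List.pyRange 0 15 1 = [0,1,2,3,4,5,6,7,8,9,10,11,12,13,14] from by decide]
    set r : Int := (|v - lower| * 15) / (upper - lower) with hrdef
    clear_value r
    by_cases hr : 0 ≤ r ∧ r < 15
    · rw [if_pos hr]
      obtain ⟨h0, h15⟩ := hr
      interval_cases r <;> rfl
    · rw [if_neg hr]
      simp only [List.map_cons, List.map_nil]
      rw [if_neg (by omega), if_neg (by omega), if_neg (by omega), if_neg (by omega),
          if_neg (by omega), if_neg (by omega), if_neg (by omega), if_neg (by omega),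
          if_neg (by omega), if_neg (by omega), if_neg (by omega), if_neg (by omega),
          if_neg (by omega), if_neg (by omega), if_neg (by omega)]
      rfl
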